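-- pv_equiv track=rewrite | github.com/jks85/MIT_Intro_Python | Recursion.py | cart_product_n
-- ===== SOURCE A (Python) =====
-- def cart_product_n(S, n:int):
--
--     '''
--     Computes the cartesian product of an iterable object S with itself n times. Returns
--     the list of tuples in the product.
--
--     For example cart_product({1,2},2) returns [(1,1), (1,2), (2,1), (1,2)]
--
--     :param s: A set of
--     :param n: integer
--     :return:
--     '''
--
--     if len(S) < 1:
--         return [tuple()]   # return list of empty tuples
--     if n == 0:
--         return [tuple()]
--     else:
--         prod_list = []
--         for x in S:     # iterate over elements of S
--             for tup in tuple(cart_product_n(S,n-1)): # iterate over tuples in previous sub product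
--                 prod_list.append((x,) + tup)        # add each element of S onto product and append to list
--     return prod_list
-- ===== SOURCE B (Python) =====
-- def cart_product_n(S, n: int):
--     S = list(S)
--     if not S:
--         return [tuple()]
--     result = [tuple()]
--     for _ in range(n):
--         result = [(x,) + t for x in S for t in result]
--     return result
-- ===== Notes on version B (the rewrite author's own statement) =====
-- stated objective: faster
-- what changed: B builds the product iteratively, computing each sub-product exactly once and reusing it, instead of A's recursion that recomputes cart_product_n(S,n-1) once per element of S at every level.
import Mathlib
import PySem

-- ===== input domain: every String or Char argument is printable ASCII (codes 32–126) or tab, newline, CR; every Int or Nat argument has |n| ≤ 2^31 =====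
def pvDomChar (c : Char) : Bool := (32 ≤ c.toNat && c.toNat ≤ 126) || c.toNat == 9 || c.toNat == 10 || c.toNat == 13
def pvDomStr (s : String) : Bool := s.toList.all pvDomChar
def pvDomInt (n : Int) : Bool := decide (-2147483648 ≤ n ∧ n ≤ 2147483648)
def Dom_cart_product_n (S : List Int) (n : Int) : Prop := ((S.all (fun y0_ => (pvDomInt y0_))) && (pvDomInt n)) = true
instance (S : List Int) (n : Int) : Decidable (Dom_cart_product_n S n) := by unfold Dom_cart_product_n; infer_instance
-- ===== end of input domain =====

-- B replaces A's recursion (which recomputes the (n-1)-subproduct once per element of S)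
-- by an iterative build that computes each sub-product exactly once: asymptotically faster.


-- ===== PORT A =====
-- Recursion on n, realised on n.toNat (inside Pre_ we have n ≥ 0, where this is exact;
-- for n < 0 with nonempty S the Python recursion never terminates — excluded by Pre_).
def cartA_go (S : List Int) : Nat → List (List Int)
  | 0 => [[]]                       -- covers both 'len(S) < 1' and 'n == 0' base returns
  | Nat.succ m =>
      if S.length < 1 then [[]]
      else S.foldl (fun prod_list x =>
             prod_list ++ (cartA_go S m).map (fun tup => x :: tup)) []

def cart_product_n (S : List Int) (n : Int) : List (List Int) :=
  if S.length < 1 then [[]] else cartA_go S n.toNat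

-- ===== PORT B =====
def cart_product_n_alt (S : List Int) (n : Int) : List (List Int) :=
  if S = [] then [[]]
  else (List.range n.toNat).foldl
        (fun result _ => S.flatMap (fun x => result.map (fun t => x :: t))) [[]]

-- ===== PRECONDITION & SPEC =====
-- Pre_ excludes nonempty S with n < 0 (unbounded recursion) or n ≥ 999 (depth n recursion
-- exceeds CPython's default recursion limit of 1000): Python A raises RecursionError there.
def Pre_cart_product_n (S : List Int) (n : Int) : Prop := S = [] ∨ (0 ≤ n ∧ n < 999)
instance (S : List Int) (n : Int) : Decidable (Pre_cart_product_n S n) := by unfold Pre_cart_product_n; infer_instance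
def pvWitness_cart_product_n : List Int × Int := ([1, 2], 2)

def Spec_cart_product_n (S : List Int) (n : Int) (out : List (List Int)) : Prop := out = cart_product_n_alt S n
instance (S : List Int) (n : Int) (out : List (List Int)) : Decidable (Spec_cart_product_n S n out) := by unfold Spec_cart_product_n; infer_instance

-- ===== CLAIM (what is proved, stated in full; the proofs are below) =====
def Claim_equal_cart_product_n : Prop := ∀ (S : List Int) (n : Int), Dom_cart_product_n S n → Pre_cart_product_n S n → Spec_cart_product_n S n (cart_product_n S n)

-- ===== LEMMAS AND PROOFS =====

-- one step of A's recursion, in flatMap form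
lemma cartA_go_succ (S : List Int) (m : Nat) (h : S ≠ []) :
    cartA_go S (m + 1) = S.flatMap (fun x => (cartA_go S m).map (fun tup => x :: tup)) := by
  simp only [cartA_go]
  rw [if_neg (by simpa [List.length_pos_iff] using h)]
  simpa using PySem.List.foldl_append_eq_flatMap
    (l := S) (acc := []) (g := fun x => (cartA_go S m).map (fun tup => x :: tup))

-- B's iterative fold computes exactly A's recursion, level by level
lemma fold_eq_cartA (S : List Int) (h : S ≠ []) (m : Nat) :
    (List.range m).foldl
        (fun result _ => S.flatMap (fun x => result.map (fun t => x :: t))) [[]]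
      = cartA_go S m := by
  induction m with
  | zero => simp [cartA_go]
  | succ k ih =>
      rw [List.range_succ, List.foldl_append, ih, cartA_go_succ S k h]
      simp

-- ===== VERDICT (by name: the statement is the Claim_ definition above) =====
theorem cart_product_n_spec : Claim_equal_cart_product_n := by
  intro S n _ _
  unfold Spec_cart_product_n cart_product_n cart_product_n_alt
  by_cases h : S = []
  · simp [h]
  · rw [if_neg (by simpa [List.length_pos_iff] using h), if_neg h, fold_eq_cartA S h]
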